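-- pv_equiv track=rewrite | github.com/Raphael-Hao/brainstorm | benchmark/livesr/archs/nas_mdsr.py | random_gradual_04
-- ===== SOURCE A (Python) =====
-- def random_gradual_04(elem_list):
--     random_list = []
--
--     if len(elem_list) == 1:
--         random_list.extend([elem_list[0]])
--     else:
--         for i in range(len(elem_list)):
--             if i == len(elem_list) - 1:
--                 random_list.extend([elem_list[i]] * (len(random_list) - 2))
--             else:
--                 random_list.extend([elem_list[i]] * 1)
--
--     return random_list
-- ===== SOURCE B (Python) =====
-- def random_gradual_04(elem_list):
--     n = len(elem_list)
--     if n <= 1: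
--         return list(elem_list)
--     return elem_list[:-1] + [elem_list[-1]] * (n - 3)
-- ===== Notes on version B (the rewrite author's own statement) =====
-- stated objective: simpler
-- what changed: Replaces the index loop with a branch at each element by a closed-form construction: the first n-1 elements once via a slice, then n-3 copies of the last element (negative repeat count is the empty list, as in Python).
import Mathlib
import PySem

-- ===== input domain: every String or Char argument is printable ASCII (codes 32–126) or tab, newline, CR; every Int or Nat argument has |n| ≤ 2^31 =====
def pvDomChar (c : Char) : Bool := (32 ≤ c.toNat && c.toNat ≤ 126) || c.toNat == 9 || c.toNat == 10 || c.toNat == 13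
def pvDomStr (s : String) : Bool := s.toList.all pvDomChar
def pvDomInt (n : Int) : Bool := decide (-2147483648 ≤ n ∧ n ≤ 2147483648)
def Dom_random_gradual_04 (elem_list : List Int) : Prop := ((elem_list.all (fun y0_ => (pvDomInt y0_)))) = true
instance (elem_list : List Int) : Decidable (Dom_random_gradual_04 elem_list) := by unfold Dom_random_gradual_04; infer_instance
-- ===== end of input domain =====

-- B replaces A's index loop (with a special branch at the last index) by a closed-form
-- construction — the first n-1 elements via a slice plus n-3 copies of the last — for simplicity.

-- ===== PORT A =====
def random_gradual_04 (elem_list : List Int) : List Int :=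
  if PySem.List.len elem_list = 1 then
    ([] : List Int) ++ [PySem.List.pyGetD elem_list 0 0]   -- index 0 guarded by len = 1
  else
    (PySem.List.pyRange 0 (PySem.List.len elem_list)).foldl
      (fun random_list i =>
        if i = PySem.List.len elem_list - 1 then
          random_list ++ List.replicate (PySem.List.len random_list - 2).toNat (PySem.List.pyGetD elem_list i 0)
        else
          random_list ++ List.replicate 1 (PySem.List.pyGetD elem_list i 0)) []

-- ===== PORT B =====
def random_gradual_04_alt (elem_list : List Int) : List Int :=
  let n := PySem.List.len elem_list
  if n ≤ 1 then elem_list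
  else
    PySem.List.slice elem_list none (some (-1)) ++
      List.replicate (n - 3).toNat (PySem.List.pyGetD elem_list (-1) 0)   -- index -1 guarded by n ≥ 2

-- ===== PRECONDITION & SPEC =====
def Spec_random_gradual_04 (elem_list : List Int) (out : List Int) : Prop := out = random_gradual_04_alt elem_list
instance (elem_list : List Int) (out : List Int) : Decidable (Spec_random_gradual_04 elem_list out) := by unfold Spec_random_gradual_04; infer_instance

-- ===== CLAIM (what is proved, stated in full; the proofs are below) =====
def Claim_equal_random_gradual_04 : Prop := ∀ (elem_list : List Int), Dom_random_gradual_04 elem_list → Spec_random_gradual_04 elem_list (random_gradual_04 elem_list)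

-- ===== LEMMAS AND PROOFS =====
theorem rg_eq (xs : List Int) : random_gradual_04 xs = random_gradual_04_alt xs := by
  match xs with
  | [] => decide
  | [x] =>
      simp [random_gradual_04, random_gradual_04_alt, PySem.List.len, PySem.List.pyGetD_zero_cons]
  | a :: b :: rest =>
      set xs := a :: b :: rest with hxs
      have hlen : 2 ≤ xs.length := by simp [hxs]
      have hne : xs ≠ [] := by simp [hxs]
      have hlenI : PySem.List.len xs = (xs.length : Int) := rfl
      have h2 : (2:Int) ≤ (xs.length : Int) := by exact_mod_cast hlen
      unfold random_gradual_04 random_gradual_04_alt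
      rw [hlenI]
      rw [if_neg (by omega), if_neg (by omega)]
      have hsplit : PySem.List.pyRange 0 (xs.length : Int)
          = PySem.List.pyRange 0 ((xs.length : Int) - 1) ++ [(xs.length : Int) - 1] := by
        have := PySem.List.pyRange_one_succ_right (a := 0) (b := (xs.length : Int) - 1) (by omega)
        rw [← this]; congr 1; omega
      rw [hsplit, List.foldl_append]
      -- the fold over indices 0 .. n-2 (single-copy branch) builds xs.dropLast
      have hpre : (PySem.List.pyRange 0 ((xs.length : Int) - 1)).foldl
          (fun random_list i =>
            if i = (xs.length : Int) - 1 then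
              random_list ++ List.replicate (PySem.List.len random_list - 2).toNat (PySem.List.pyGetD xs i 0)
            else
              random_list ++ List.replicate 1 (PySem.List.pyGetD xs i 0)) []
          = xs.dropLast := by
        rw [PySem.List.foldl_congr_mem _ _
            (fun acc i => acc ++ [PySem.List.pyGetD xs.dropLast i 0]) _ ?_]
        · rw [PySem.List.foldl_append_singleton_eq_map]
          have hl : (xs.length : Int) - 1 = PySem.List.len xs.dropLast := by
            simp [PySem.List.len]; omega
          rw [hl, PySem.List.map_pyGetD_pyRange_zero]
          simp
        · intro acc i hi
          rw [PySem.List.mem_pyRange_one] at hi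
          have h1 : PySem.List.pyGetD xs i 0 = xs[i.toNat]'(by omega) :=
            PySem.List.pyGetD_eq_getElem xs 0 hi.1 (by omega)
          have h2' : PySem.List.pyGetD xs.dropLast i 0 = xs.dropLast[i.toNat]'(by simp; omega) :=
            PySem.List.pyGetD_eq_getElem xs.dropLast 0 hi.1 (by simp; omega)
          simp [h1, h2', List.getElem_dropLast, show ¬ i = (xs.length : Int) - 1 from by omega]
      rw [hpre]
      simp only [List.foldl_cons, List.foldl_nil]
      rw [if_pos trivial]
      -- last step: n-3 copies of the last element
      have hlast : PySem.List.pyGetD xs ((xs.length : Int) - 1) 0 = PySem.List.pyGetD xs (-1) 0 := by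
        rw [PySem.List.pyGetD_eq_getElem xs 0 (by omega) (by omega),
            PySem.List.pyGetD_neg_one xs 0 hne, List.getLast_eq_getElem]
        congr 1; omega
      rw [hlast, PySem.List.slice_to_neg_one]
      congr 2
      · simp [PySem.List.len]; omega

-- ===== VERDICT (by name: the statement is the Claim_ definition above) =====
theorem random_gradual_04_spec : Claim_equal_random_gradual_04 := by
  intro xs _
  unfold Spec_random_gradual_04
  exact rg_eq xs
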